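-- pv_equiv track=rewrite | github.com/TomCa56/python2048 | j2048_motor_42357.py | somar_esquerda
-- ===== SOURCE A (Python) =====
-- def somar_esquerda(uma_lista, movimento, pontos):
--
--     resultado = []
--     vitoria = False
--     index = 0
--
--     while(index < len(uma_lista) - 1):
--         if uma_lista[index] == uma_lista[index + 1]:
--             soma = uma_lista[index] + uma_lista[index + 1]
--             resultado.append(soma)
--             index = index + 2
--             if soma > 0:
--                 movimento = True
--                 pontos = pontos + soma
--         else:
--             resultado.append(uma_lista[index])
--             index = index + 1
--     if(index == len(uma_lista) - 1):
--         resultado.append(uma_lista[index])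
--     while(len(resultado) < len(uma_lista)):
--         resultado.append(0)
--
--     return (resultado, movimento, pontos, vitoria)
-- ===== SOURCE B (Python) =====
-- def somar_esquerda(uma_lista, movimento, pontos):
--     resultado = []
--     acabou_de_juntar = False
--     ganhos = 0
--     for tile in uma_lista:
--         if resultado and not acabou_de_juntar and resultado[-1] == tile:
--             resultado[-1] += tile
--             acabou_de_juntar = True
--             if resultado[-1] > 0:
--                 ganhos += resultado[-1]
--         else:
--             resultado.append(tile)
--             acabou_de_juntar = False
--     resultado.extend([0] * (len(uma_lista) - len(resultado)))
--     return (resultado, movimento or ganhos > 0, pontos + ganhos, False)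
-- ===== Notes on version B (the rewrite author's own statement) =====
-- stated objective: idiomatic
-- what changed: Replaces A's index-jumping while loop (index += 2 on a merge, post-loop leftover-element append) by a single forward for-loop over the tiles that keeps a just-merged flag and merges into the last result cell, accumulating the positive merge gains once and deriving movimento/pontos from them at the end.
import Mathlib
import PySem

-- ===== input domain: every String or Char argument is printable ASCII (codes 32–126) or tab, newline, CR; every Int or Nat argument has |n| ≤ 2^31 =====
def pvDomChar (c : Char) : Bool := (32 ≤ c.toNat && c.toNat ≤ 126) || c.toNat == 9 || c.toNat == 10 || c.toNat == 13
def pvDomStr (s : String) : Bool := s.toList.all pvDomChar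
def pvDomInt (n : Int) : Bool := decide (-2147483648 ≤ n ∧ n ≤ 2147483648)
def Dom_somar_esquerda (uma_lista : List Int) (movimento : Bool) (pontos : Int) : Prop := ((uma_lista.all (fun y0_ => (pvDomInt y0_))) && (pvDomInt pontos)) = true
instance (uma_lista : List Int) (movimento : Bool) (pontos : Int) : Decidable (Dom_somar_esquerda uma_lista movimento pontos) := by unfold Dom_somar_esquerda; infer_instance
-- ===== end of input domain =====

-- B replaces A's index-jumping while loop by a single forward pass with a just-merged flag (idiomatic; same cost).

-- ===== PORT A =====
-- A's while loop: index walks the list, merging equal adjacent pairs (index += 2) or copying one tile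
-- (index += 1); on exit, Python's post-loop `if index == len-1: append` is the base case here.
def somarLoopA (l : List Int) (index : Nat) (resultado : List Int) (movimento : Bool) (pontos : Int) :
    List Int × Bool × Int :=
  if _h : index + 1 < l.length then
    let a := l.getD index 0
    let b := l.getD (index + 1) 0
    if a = b then
      let soma := a + b
      somarLoopA l (index + 2) (resultado ++ [soma])
        (if soma > 0 then true else movimento)
        (if soma > 0 then pontos + soma else pontos)
    else
      somarLoopA l (index + 1) (resultado ++ [a]) movimento pontos
  else
    if index + 1 = l.length then (resultado ++ [l.getD index 0], movimento, pontos)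
    else (resultado, movimento, pontos)
termination_by l.length - index

def somar_esquerda (uma_lista : List Int) (movimento : Bool) (pontos : Int) :
    List Int × Bool × Int × Bool :=
  let r := somarLoopA uma_lista 0 [] movimento pontos
  -- the trailing `while len(resultado) < len(uma_lista): append(0)` zero-padding
  (r.1 ++ List.replicate (uma_lista.length - r.1.length) 0, r.2.1, r.2.2, false)

-- ===== PORT B =====
-- one step of B's for-loop: state = (resultado, acabou_de_juntar, ganhos)
def bStep (st : List Int × Bool × Int) (tile : Int) : List Int × Bool × Int :=
  match st with
  | (resultado, jm, ganhos) =>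
    match resultado.getLast? with
    | some last =>
      if ¬jm ∧ last = tile then
        let v := last + tile
        (resultado.dropLast ++ [v], true, if v > 0 then ganhos + v else ganhos)
      else (resultado ++ [tile], false, ganhos)
    | none => (resultado ++ [tile], false, ganhos)

def somar_esquerda_alt (uma_lista : List Int) (movimento : Bool) (pontos : Int) :
    List Int × Bool × Int × Bool :=
  let st := uma_lista.foldl bStep ([], false, 0)
  (st.1 ++ List.replicate (uma_lista.length - st.1.length) 0,
   movimento || decide (st.2.2 > 0), pontos + st.2.2, false)

-- ===== PRECONDITION & SPEC =====
def Spec_somar_esquerda (uma_lista : List Int) (movimento : Bool) (pontos : Int) (out : List Int × Bool × Int × Bool) : Prop := out = somar_esquerda_alt uma_lista movimento pontos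
instance (uma_lista : List Int) (movimento : Bool) (pontos : Int) (out : List Int × Bool × Int × Bool) : Decidable (Spec_somar_esquerda uma_lista movimento pontos out) := by unfold Spec_somar_esquerda; infer_instance

-- ===== CLAIM (what is proved, stated in full; the proofs are below) =====
def Claim_equal_somar_esquerda : Prop := ∀ (uma_lista : List Int) (movimento : Bool) (pontos : Int), Dom_somar_esquerda uma_lista movimento pontos → Spec_somar_esquerda uma_lista movimento pontos (somar_esquerda uma_lista movimento pontos)

-- ===== LEMMAS AND PROOFS =====

-- common reference: merged row and total positive gains, by pairwise recursion on the list
def mergeRec : List Int → List Int × Int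
  | a :: b :: rest =>
    if a = b then
      let p := mergeRec rest
      ((a + b) :: p.1, (if a + b > 0 then a + b else 0) + p.2)
    else
      let p := mergeRec (b :: rest)
      (a :: p.1, p.2)
  | [a] => ([a], 0)
  | [] => ([], 0)

theorem mergeRec_gain_nonneg (l : List Int) : 0 ≤ (mergeRec l).2 := by
  match l with
  | [] => simp [mergeRec]
  | [a] => simp [mergeRec]
  | a :: b :: rest =>
    have h1 := mergeRec_gain_nonneg rest
    have h2 := mergeRec_gain_nonneg (b :: rest)
    simp only [mergeRec]
    by_cases hab : a = b
    · rw [if_pos hab]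
      dsimp only
      split <;> omega
    · rw [if_neg hab]
      exact h2
termination_by l.length

theorem somarLoopA_eq (l : List Int) (index : Nat) (res : List Int) (mov : Bool) (pts : Int) :
    somarLoopA l index res mov pts =
      (res ++ (mergeRec (l.drop index)).1,
       mov || decide (0 < (mergeRec (l.drop index)).2),
       pts + (mergeRec (l.drop index)).2) := by
  by_cases h : index + 1 < l.length
  · have h1 : index < l.length := by omega
    have hd : l.drop index = l.getD index 0 :: l.getD (index + 1) 0 :: l.drop (index + 2) := by
      rw [List.getD_eq_getElem l 0 h1, List.getD_eq_getElem l 0 h]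
      rw [List.drop_eq_getElem_cons h1, List.drop_eq_getElem_cons h]
    by_cases heq : l.getD index 0 = l.getD (index + 1) 0
    · have ih := somarLoopA_eq l (index + 2) (res ++ [l.getD index 0 + l.getD (index + 1) 0])
        (if l.getD index 0 + l.getD (index + 1) 0 > 0 then true else mov)
        (if l.getD index 0 + l.getD (index + 1) 0 > 0 then pts + (l.getD index 0 + l.getD (index + 1) 0) else pts)
      have hn := mergeRec_gain_nonneg (l.drop (index + 2))
      rw [somarLoopA]
      simp only [dif_pos h, if_pos heq]
      rw [ih, hd]
      simp only [mergeRec, if_pos heq, Prod.mk.injEq]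
      refine ⟨by simp, ?_, ?_⟩
      · by_cases hs : l.getD index 0 + l.getD (index + 1) 0 > 0
        · rw [if_pos hs, if_pos hs, Bool.true_or]
          have hdec : decide (0 < l.getD index 0 + l.getD (index + 1) 0 + (mergeRec (List.drop (index + 2) l)).2) = true :=
            decide_eq_true (by omega)
          rw [hdec, Bool.or_true]
        · rw [if_neg hs, if_neg hs, zero_add]
      · by_cases hs : l.getD index 0 + l.getD (index + 1) 0 > 0
        · rw [if_pos hs, if_pos hs]; ring
        · rw [if_neg hs, if_neg hs, zero_add]
    · have ih := somarLoopA_eq l (index + 1) (res ++ [l.getD index 0]) mov pts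
      have hd1 : l.drop (index + 1) = l.getD (index + 1) 0 :: l.drop (index + 2) := by
        rw [List.getD_eq_getElem l 0 h, List.drop_eq_getElem_cons h]
      rw [somarLoopA]
      simp only [dif_pos h, if_neg heq]
      rw [ih, hd]
      simp only [mergeRec, if_neg heq]
      rw [← hd1]
      simp
  · by_cases h2 : index + 1 = l.length
    · have h1 : index < l.length := by omega
      have hd : l.drop index = [l.getD index 0] := by
        rw [List.getD_eq_getElem l 0 h1, List.drop_eq_getElem_cons h1]
        have : l.drop (index + 1) = [] := by apply List.drop_eq_nil_of_le; omega
        rw [this]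
      rw [somarLoopA]
      simp [h, h2, hd, mergeRec]
    · have hd : l.drop index = [] := by apply List.drop_eq_nil_of_le; omega
      rw [somarLoopA]
      simp [h, h2, hd, mergeRec]
termination_by l.length - index

-- B's fold, characterised against mergeRec (mutual: after a merge / after a plain append)
mutual
theorem foldB_jm (l : List Int) (res : List Int) (g : Int) :
    ∃ jm', l.foldl bStep (res, true, g) =
      (res ++ (mergeRec l).1, jm', g + (mergeRec l).2) := by
  match l with
  | [] => exact ⟨true, by simp [mergeRec]⟩
  | a :: rest =>
    have step : bStep (res, true, g) a = (res ++ [a], false, g) := by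
      unfold bStep
      cases h : res.getLast? <;> simp [h]
    obtain ⟨jm', hj⟩ := foldB_app rest a res g
    refine ⟨jm', ?_⟩
    simp only [List.foldl_cons, step, hj]
termination_by 2 * l.length

theorem foldB_app (l : List Int) (a : Int) (res : List Int) (g : Int) :
    ∃ jm', l.foldl bStep (res ++ [a], false, g) =
      (res ++ (mergeRec (a :: l)).1, jm', g + (mergeRec (a :: l)).2) := by
  match l with
  | [] => exact ⟨false, by simp [mergeRec]⟩
  | b :: rest =>
    have hlast : (res ++ [a]).getLast? = some a := by simp
    by_cases hab : a = b
    · have step : bStep (res ++ [a], false, g) b =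
          (res ++ [a + b], true, if a + b > 0 then g + (a + b) else g) := by
        unfold bStep
        simp [hlast, hab]
      obtain ⟨jm', hj⟩ := foldB_jm rest (res ++ [a + b]) (if a + b > 0 then g + (a + b) else g)
      refine ⟨jm', ?_⟩
      simp only [List.foldl_cons, step, hj]
      simp only [mergeRec, if_pos hab, Prod.mk.injEq]
      refine ⟨by simp, by trivial, ?_⟩
      by_cases hs : a + b > 0
      · rw [if_pos hs, if_pos hs]; ring
      · rw [if_neg hs, if_neg hs]; ring
    · have step : bStep (res ++ [a], false, g) b = (res ++ [a] ++ [b], false, g) := by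
        unfold bStep
        simp [hab]
      obtain ⟨jm', hj⟩ := foldB_app rest b (res ++ [a]) g
      refine ⟨jm', ?_⟩
      simp only [List.foldl_cons, step, hj]
      simp only [mergeRec, if_neg hab]
      simp
termination_by 2 * l.length + 1
end

theorem foldB_eq (l : List Int) :
    ∃ jm', l.foldl bStep ([], false, 0) = ((mergeRec l).1, jm', (mergeRec l).2) := by
  match l with
  | [] => exact ⟨false, by simp [mergeRec]⟩
  | a :: rest =>
    have step : bStep ([], false, 0) a = ([a], false, 0) := by unfold bStep; simp
    obtain ⟨jm', hj⟩ := foldB_app rest a [] 0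
    refine ⟨jm', ?_⟩
    simp only [List.foldl_cons, step]
    simpa using hj

-- ===== VERDICT (by name: the statement is the Claim_ definition above) =====
theorem somar_esquerda_spec : Claim_equal_somar_esquerda := by
  intro l mov pts _
  unfold Spec_somar_esquerda somar_esquerda somar_esquerda_alt
  obtain ⟨jm', hB⟩ := foldB_eq l
  rw [hB, somarLoopA_eq]
  simp only [List.drop_zero, List.nil_append, gt_iff_lt]
  rfl
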